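-- pv_equiv track=rewrite | github.com/juanceresa/sift-kg | src/sift_kg/graph/prededup.py | _pick_canonical
-- ===== SOURCE A (Python) =====
-- from collections import Counter
--
-- def _pick_canonical(names: list[str]) -> str:
--     """Pick the best canonical name from a group of variants.
--
--     Priority: most frequent -> longest -> alphabetically first.
--     """
--     if len(names) == 1:
--         return names[0]
--
--     counts = Counter(names)
--     max_count = max(counts.values())
--     most_frequent = [n for n, c in counts.items() if c == max_count]
--
--     if len(most_frequent) == 1:
--         return most_frequent[0]
--
--     # Tiebreak: longest name (likely more complete)
--     max_len = max(len(n) for n in most_frequent)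
--     longest = [n for n in most_frequent if len(n) == max_len]
--
--     return sorted(longest)[0]
-- ===== SOURCE B (Python) =====
-- def _pick_canonical(names: list[str]) -> str:
--     """Pick the best canonical name: most frequent -> longest -> alphabetically first.
--
--     Sort once, then scan adjacent runs of equal names keeping a running best
--     by (run length, name length); ties keep the earlier (alphabetically first) run.
--     """
--     s = sorted(names)
--     best = None
--     best_name = ""
--     i = 0
--     n = len(s)
--     while i < n:
--         j = i + 1
--         while j < n and s[j] == s[i]:
--             j += 1
--         cand = (j - i, len(s[i]))
--         if best is None or cand > best:
--             best = cand
--             best_name = s[i]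
--         i = j
--     return best_name
-- ===== Notes on version B (the rewrite author's own statement) =====
-- stated objective: alternative
-- what changed: Replaces the Counter + staged-filter pipeline (max count, filter, max length, filter, sort of the finalists) with a sort-then-run-scan: sort the names once, walk adjacent runs of equal names, and keep a running best by (run length, name length), ties keeping the earlier run so the alphabetically first name wins.
import Mathlib
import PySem

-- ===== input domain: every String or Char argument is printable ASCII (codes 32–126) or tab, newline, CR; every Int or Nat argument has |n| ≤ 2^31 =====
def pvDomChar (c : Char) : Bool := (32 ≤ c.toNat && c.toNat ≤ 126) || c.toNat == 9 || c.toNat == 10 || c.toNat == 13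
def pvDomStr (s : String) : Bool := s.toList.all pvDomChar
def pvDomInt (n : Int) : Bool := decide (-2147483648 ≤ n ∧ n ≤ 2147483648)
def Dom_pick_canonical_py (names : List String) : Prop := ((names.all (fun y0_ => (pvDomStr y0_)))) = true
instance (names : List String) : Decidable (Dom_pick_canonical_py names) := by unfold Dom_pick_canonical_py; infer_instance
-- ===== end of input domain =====

-- B replaces A's Counter + staged-filter pipeline with a sort-then-run-scan: sort once,
-- walk adjacent runs of equal names, keep a running best by (run length, name length),
-- ties keeping the earlier (alphabetically first) run; same return value on nonempty input.


-- ===== PORT A =====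
-- A's locals, kept as named helpers: counts, max_count, most_frequent, max_len, longest
def aCounts (names : List String) : PySem.Dict String Int := PySem.Dict.counter names
def aMaxCount (names : List String) : Int :=
  (PySem.List.max? (aCounts names).values (fun v => v)).getD 0
def aMostFrequent (names : List String) : List String :=
  ((aCounts names).items.filter (fun p => p.2 == aMaxCount names)).map Prod.fst
def aMaxLen (names : List String) : Int :=
  (PySem.List.max? ((aMostFrequent names).map (fun n => PySem.Str.len n)) (fun v => v)).getD 0
def aLongest (names : List String) : List String :=
  (aMostFrequent names).filter (fun n => PySem.Str.len n == aMaxLen names)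

def pick_canonical_py (names : List String) : String :=
  if names.length == 1 then (PySem.List.pyGet? names 0).getD ""
  else if (aMostFrequent names).length == 1 then (PySem.List.pyGet? (aMostFrequent names) 0).getD ""
  else (PySem.List.pyGet? (PySem.List.sorted (aLongest names) (fun n => n)) 0).getD ""

-- ===== PORT B =====
-- Python's tuple comparison 'cand > best' on (int, int) pairs, ported exactly
def lexGtPair (a b : Int × Int) : Bool :=
  decide (b.1 < a.1) || (a.1 == b.1 && decide (b.2 < a.2))

-- the outer while loop of Source B: each step consumes one run of equal names from the
-- sorted list (the inner while = takeWhile/dropWhile) and updates (best, best_name)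
def bScan : List String → Option (Int × Int) → String → String
  | [], _, bn => bn
  | x :: rs, best, bn =>
    let run := rs.takeWhile (fun y => y == x)
    let rest' := rs.dropWhile (fun y => y == x)
    let cand : Int × Int := ((run.length : Int) + 1, PySem.Str.len x)
    if best.elim true (fun b => lexGtPair cand b)
    then bScan rest' (some cand) x
    else bScan rest' best bn
  termination_by l => l.length
  decreasing_by
    all_goals
      have h := List.Sublist.length_le (List.dropWhile_sublist (p := fun y => y == x) (l := rs))
      simp only [List.length_cons]; omega

def pick_canonical_py_alt (names : List String) : String :=
  bScan (PySem.List.sorted names (fun n => n)) none ""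

-- ===== PRECONDITION & SPEC =====
-- Pre_ excludes only the empty list, on which A raises ValueError (max() of an empty sequence).
def Pre_pick_canonical_py (names : List String) : Prop := names ≠ []
instance (names : List String) : Decidable (Pre_pick_canonical_py names) := by unfold Pre_pick_canonical_py; infer_instance
def pvWitness_pick_canonical_py : List String := (["a"])
def Spec_pick_canonical_py (names : List String) (out : String) : Prop := out = pick_canonical_py_alt names
instance (names : List String) (out : String) : Decidable (Spec_pick_canonical_py names out) := by unfold Spec_pick_canonical_py; infer_instance

-- ===== CLAIM (what is proved, stated in full; the proofs are below) =====
def Claim_equal_pick_canonical_py : Prop := ∀ (names : List String), Dom_pick_canonical_py names → Pre_pick_canonical_py names → Spec_pick_canonical_py names (pick_canonical_py names)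

-- ===== LEMMAS AND PROOFS =====

-- the composite selection key both programs effectively minimize
def pkey (ns : List String) (n : String) : Lex (Int × Lex (Int × String)) :=
  toLex (-((ns.count n : Int)), toLex (-(PySem.Str.len n), n))

def PKMin (ns : List String) (m : String) : Prop :=
  m ∈ ns ∧ ∀ x ∈ ns, pkey ns m ≤ pkey ns x

lemma pkey_inj {ns : List String} {a b : String} (h : pkey ns a = pkey ns b) : a = b := by
  simp only [pkey, toLex_inj, Prod.mk.injEq] at h
  exact h.2.2

lemma pkey_le_iff (ns : List String) (a b : String) :
    pkey ns a ≤ pkey ns b ↔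
      ((ns.count b : Int) < (ns.count a : Int)) ∨
      ((ns.count a : Int) = (ns.count b : Int) ∧
        (PySem.Str.len b < PySem.Str.len a ∨ (PySem.Str.len a = PySem.Str.len b ∧ a ≤ b))) := by
  simp [pkey, Prod.Lex.le_iff, neg_lt_neg_iff, neg_inj]

lemma pkey_lt_iff (ns : List String) (a b : String) :
    pkey ns a < pkey ns b ↔
      ((ns.count b : Int) < (ns.count a : Int)) ∨
      ((ns.count a : Int) = (ns.count b : Int) ∧
        (PySem.Str.len b < PySem.Str.len a ∨ (PySem.Str.len a = PySem.Str.len b ∧ a < b))) := by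
  simp [pkey, Prod.Lex.lt_iff, neg_lt_neg_iff, neg_inj]

lemma pkMin_unique {ns : List String} {m m' : String}
    (h1 : PKMin ns m) (h2 : PKMin ns m') : m = m' :=
  pkey_inj (le_antisymm (h1.2 m' h2.1) (h2.2 m h1.1))

lemma foldl_max_some {α κ : Type} [LT κ] [DecidableLT κ] (key : α → κ) :
    ∀ (t : List α) (a : α), ∃ m, List.foldl
      (fun acc x => match acc with
        | none => some x
        | some m => if key m < key x then some x else some m) (some a) t = some m := by
  intro t
  induction t with
  | nil => intro a; exact ⟨a, rfl⟩
  | cons b t ih =>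
    intro a
    by_cases h : key a < key b <;> simp [List.foldl, h] <;> exact ih _

lemma max?_some {α κ : Type} [LT κ] [DecidableLT κ] (xs : List α) (key : α → κ)
    (h : xs ≠ []) : ∃ m, PySem.List.max? xs key = some m := by
  obtain ⟨a, t, rfl⟩ := List.exists_cons_of_ne_nil h
  simpa [PySem.List.max?] using foldl_max_some key t a

lemma values_counter (ns : List String) :
    (aCounts ns).values = (PySem.Set.ofList ns).map (fun k => ((ns.count k : Int))) := by
  simp [aCounts, PySem.Dict.values, PySem.Dict.items_counter, List.map_map]

lemma maxCount_spec {ns : List String} (h : ns ≠ []) :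
    (∀ x ∈ ns, (ns.count x : Int) ≤ aMaxCount ns) ∧
      ∃ k ∈ ns, (ns.count k : Int) = aMaxCount ns := by
  have hvne : (aCounts ns).values ≠ [] := by
    rw [values_counter]
    obtain ⟨a, t, rfl⟩ := List.exists_cons_of_ne_nil h
    have : a ∈ PySem.Set.ofList (a :: t) := (PySem.Set.mem_ofList _ _).mpr (List.mem_cons_self)
    intro hnil
    simp [List.map_eq_nil_iff] at hnil
    rw [hnil] at this
    exact absurd this (List.not_mem_nil)
  obtain ⟨mc, hmc⟩ := max?_some (aCounts ns).values (fun v => v) hvne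
  have hmax : aMaxCount ns = mc := by simp only [aMaxCount, hmc, Option.getD_some]
  constructor
  · intro x hx
    have hmem : ((ns.count x : Int)) ∈ (aCounts ns).values := by
      rw [values_counter]
      exact List.mem_map.mpr ⟨x, (PySem.Set.mem_ofList _ _).mpr hx, rfl⟩
    have := PySem.List.max?_isMax hmc _ hmem
    simpa [hmax] using this
  · have hmem := PySem.List.max?_mem hmc
    rw [values_counter] at hmem
    obtain ⟨k, hk, hkeq⟩ := List.mem_map.mp hmem
    exact ⟨k, (PySem.Set.mem_ofList _ _).mp hk, by rw [hkeq, hmax]⟩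

lemma mem_mostFrequent (ns : List String) (x : String) :
    x ∈ aMostFrequent ns ↔ x ∈ ns ∧ (ns.count x : Int) = aMaxCount ns := by
  simp [aMostFrequent, aCounts, PySem.Dict.items_counter, List.mem_map, List.mem_filter,
    PySem.Set.mem_ofList, beq_iff_eq]

lemma mostFrequent_ne_nil {ns : List String} (h : ns ≠ []) : aMostFrequent ns ≠ [] := by
  obtain ⟨k, hk, hkc⟩ := (maxCount_spec h).2
  exact List.ne_nil_of_mem ((mem_mostFrequent ns k).mpr ⟨hk, hkc⟩)

lemma maxLen_spec {ns : List String} (h : aMostFrequent ns ≠ []) :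
    (∀ x ∈ aMostFrequent ns, PySem.Str.len x ≤ aMaxLen ns) ∧
      ∃ k ∈ aMostFrequent ns, PySem.Str.len k = aMaxLen ns := by
  have hmne : (aMostFrequent ns).map (fun n => PySem.Str.len n) ≠ [] := by
    simpa [List.map_eq_nil_iff] using h
  obtain ⟨ml, hml⟩ := max?_some _ (fun v => v) hmne
  have hmax : aMaxLen ns = ml := by simp only [aMaxLen, hml, Option.getD_some]
  constructor
  · intro x hx
    have hmem : PySem.Str.len x ∈ (aMostFrequent ns).map (fun n => PySem.Str.len n) :=
      List.mem_map.mpr ⟨x, hx, rfl⟩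
    have := PySem.List.max?_isMax hml _ hmem
    simpa [hmax] using this
  · have hmem := PySem.List.max?_mem hml
    obtain ⟨k, hk, hkeq⟩ := List.mem_map.mp hmem
    exact ⟨k, hk, by rw [hkeq, hmax]⟩

lemma mem_longest (ns : List String) (x : String) :
    x ∈ aLongest ns ↔ x ∈ aMostFrequent ns ∧ PySem.Str.len x = aMaxLen ns := by
  simp [aLongest, List.mem_filter, beq_iff_eq]

lemma sorted_head_min {α κ : Type} [LinearOrder κ] (xs : List α) (key : α → κ)
    (h : xs ≠ []) : ∃ m t, PySem.List.sorted xs key = m :: t ∧ m ∈ xs ∧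
      ∀ x ∈ xs, key m ≤ key x := by
  have hp := PySem.List.sorted_perm xs key false
  have hpw := PySem.List.sorted_pairwise xs key
  cases hs : PySem.List.sorted xs key with
  | nil =>
    rw [hs] at hp
    exact absurd hp.symm.eq_nil h
  | cons m t =>
    rw [hs] at hp hpw
    refine ⟨m, t, rfl, hp.subset List.mem_cons_self, ?_⟩
    intro x hx
    rcases List.mem_cons.mp (hp.symm.subset hx) with rfl | hxt
    · exact le_refl _
    · exact (List.pairwise_cons.mp hpw).1 x hxt

lemma A_isMin (ns : List String) (h : ns ≠ []) : PKMin ns (pick_canonical_py ns) := by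
  have hmf := mostFrequent_ne_nil h
  have hcs := maxCount_spec h
  by_cases h1 : (ns.length == 1) = true
  · obtain ⟨a, rfl⟩ := List.length_eq_one_iff.mp (by simpa using h1)
    have hval : pick_canonical_py [a] = a := rfl
    rw [hval]
    refine ⟨List.mem_cons_self, ?_⟩
    rintro x hx
    rcases List.mem_cons.mp hx with rfl | hx
    · exact le_refl _
    · exact absurd hx (List.not_mem_nil)
  · rw [Bool.not_eq_true] at h1
    have hls := maxLen_spec hmf
    by_cases h2 : ((aMostFrequent ns).length == 1) = true
    · obtain ⟨m, hm⟩ := List.length_eq_one_iff.mp (by simpa using h2)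
      have hval : pick_canonical_py ns = m := by
        simp [pick_canonical_py, h1, hm, PySem.List.pyGet?, PySem.List.pyIdx?]
      rw [hval]
      have hmmem : m ∈ aMostFrequent ns := by rw [hm]; exact List.mem_cons_self
      have hmns := ((mem_mostFrequent ns m).mp hmmem).1
      refine ⟨hmns, fun x hx => ?_⟩
      rw [pkey_le_iff]
      by_cases hcx : (ns.count x : Int) = aMaxCount ns
      · have : x ∈ aMostFrequent ns := (mem_mostFrequent ns x).mpr ⟨hx, hcx⟩
        rw [hm] at this
        rcases List.mem_cons.mp this with rfl | hfalse
        · exact Or.inr ⟨rfl, Or.inr ⟨rfl, le_refl _⟩⟩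
        · exact absurd hfalse (List.not_mem_nil)
      · left
        have hle := hcs.1 x hx
        have hmc := ((mem_mostFrequent ns m).mp hmmem).2
        omega
    · rw [Bool.not_eq_true] at h2
      have hlne : aLongest ns ≠ [] := by
        obtain ⟨k, hk, hkl⟩ := hls.2
        exact List.ne_nil_of_mem ((mem_longest ns k).mpr ⟨hk, hkl⟩)
      obtain ⟨m, t, hst, hmem, hmin⟩ := sorted_head_min (aLongest ns) (fun n => n) hlne
      have hval : pick_canonical_py ns = m := by
        simp [pick_canonical_py, h1, h2, hst, PySem.List.pyGet?, PySem.List.pyIdx?]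
      rw [hval]
      have hmmf : m ∈ aMostFrequent ns := ((mem_longest ns m).mp hmem).1
      have hml : PySem.Str.len m = aMaxLen ns := ((mem_longest ns m).mp hmem).2
      have hmc : (ns.count m : Int) = aMaxCount ns := ((mem_mostFrequent ns m).mp hmmf).2
      refine ⟨((mem_mostFrequent ns m).mp hmmf).1, fun x hx => ?_⟩
      rw [pkey_le_iff]
      by_cases hcx : (ns.count x : Int) = aMaxCount ns
      · have hxmf : x ∈ aMostFrequent ns := (mem_mostFrequent ns x).mpr ⟨hx, hcx⟩
        right
        refine ⟨by omega, ?_⟩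
        by_cases hlx : PySem.Str.len x = aMaxLen ns
        · have hxl : x ∈ aLongest ns := (mem_longest ns x).mpr ⟨hxmf, hlx⟩
          exact Or.inr ⟨by omega, hmin x hxl⟩
        · left
          have := hls.1 x hxmf
          omega
      · left
        have hle := hcs.1 x hx
        omega

-- ===== B-side lemmas: the sorted run-scan picks the pkey-minimum =====

-- on a sorted list x :: rs, the takeWhile run is exactly the occurrences of x in rs,
-- and everything after the run is strictly greater than x
lemma run_split : ∀ (x : String) (rs : List String),
    (x :: rs).Pairwise (· ≤ ·) →
    (rs.takeWhile (fun y => y == x)).length = rs.count x ∧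
      ∀ y ∈ rs.dropWhile (fun y => y == x), x < y := by
  intro x rs
  induction rs with
  | nil => intro _; simp
  | cons b rs' ih =>
    intro hpw
    have hpwb : (b :: rs').Pairwise (· ≤ ·) := (List.pairwise_cons.mp hpw).2
    by_cases hb : b = x
    · subst hb
      obtain ⟨h1, h2⟩ := ih hpwb
      constructor
      · rw [List.takeWhile_cons_of_pos (by simp), List.length_cons, h1, List.count_cons_self]
      · rw [List.dropWhile_cons_of_pos (by simp)]
        exact h2
    · have hxb : x < b :=
        lt_of_le_of_ne ((List.pairwise_cons.mp hpw).1 b List.mem_cons_self) (fun h => hb h.symm)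
      constructor
      · rw [List.takeWhile_cons_of_neg (by simp [hb])]
        rw [List.length_nil]
        symm
        rw [List.count_eq_zero]
        intro hmem
        rcases List.mem_cons.mp hmem with rfl | hmem'
        · exact absurd rfl (ne_of_lt hxb)
        · exact absurd ((List.pairwise_cons.mp hpwb).1 x hmem') (not_le.mpr hxb)
      · rw [List.dropWhile_cons_of_neg (by simp [hb])]
        intro y hy
        rcases List.mem_cons.mp hy with rfl | hy'
        · exact hxb
        · exact lt_of_lt_of_le hxb ((List.pairwise_cons.mp hpwb).1 y hy')

-- counting past a consumed run: for y ≠ x, occurrences of y in x :: rs all lie after the run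
lemma count_after_run (x : String) (rs : List String) (y : String) (hy : y ≠ x) :
    (x :: rs).count y = (rs.dropWhile (fun z => z == x)).count y := by
  have htake : (rs.takeWhile (fun z => z == x)).count y = 0 := by
    rw [List.count_eq_zero]
    intro hmem
    exact hy (by simpa using List.mem_takeWhile_imp hmem)
  calc (x :: rs).count y = rs.count y := List.count_cons_of_ne (Ne.symm hy)
    _ = ((rs.takeWhile (fun z => z == x)) ++ (rs.dropWhile (fun z => z == x))).count y := by
        rw [List.takeWhile_append_dropWhile]
    _ = (rs.takeWhile (fun z => z == x)).count y + (rs.dropWhile (fun z => z == x)).count y :=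
        List.count_append ..
    _ = (rs.dropWhile (fun z => z == x)).count y := by rw [htake, zero_add]

-- main invariant of the outer while loop
lemma bScan_inv (t : List String) : ∀ (n : ℕ) (rest : List String) (bn : String),
    rest.length ≤ n →
    rest.Pairwise (· ≤ ·) →
    (∀ y ∈ rest, t.count y = rest.count y) →
    (∀ y ∈ rest, bn < y) →
    bn ∈ t →
    (∀ y ∈ t, y ∉ rest → pkey t bn ≤ pkey t y) →
    bScan rest (some ((t.count bn : Int), PySem.Str.len bn)) bn ∈ t ∧
      ∀ x ∈ t, pkey t (bScan rest (some ((t.count bn : Int), PySem.Str.len bn)) bn) ≤ pkey t x := by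
  intro n
  induction n with
  | zero =>
    intro rest bn hlen _ _ _ hbnmem hproc
    have : rest = [] := List.eq_nil_of_length_eq_zero (Nat.le_zero.mp hlen)
    subst this
    simp only [bScan]
    exact ⟨hbnmem, fun x hx => hproc x hx (List.not_mem_nil)⟩
  | succ n ih =>
    intro rest bn hlen hpw hcount hbnlt hbnmem hproc
    match rest with
    | [] =>
      simp only [bScan]
      exact ⟨hbnmem, fun x hx => hproc x hx (List.not_mem_nil)⟩
    | x :: rs =>
      obtain ⟨hrun, hdrop⟩ := run_split x rs hpw
      set rest' := rs.dropWhile (fun y => y == x) with hrest'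
      have hcx : ((rs.takeWhile (fun y => y == x)).length : Int) + 1 = (t.count x : Int) := by
        have := hcount x List.mem_cons_self
        rw [this, List.count_cons_self, hrun]
        push_cast
        ring
      have hxmem : x ∈ t := by
        rw [← List.count_pos_iff]
        have := hcount x List.mem_cons_self
        rw [this]
        simp [List.count_cons_self]
      have hrest'len : rest'.length ≤ n := by
        have h := List.Sublist.length_le (List.dropWhile_sublist (p := fun y => y == x) (l := rs))
        rw [← hrest'] at h
        simp only [List.length_cons] at hlen
        omega
      have hrest'pw : rest'.Pairwise (· ≤ ·) :=
        hpw.sublist ((List.dropWhile_sublist _).trans (by simp))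
      have hrest'count : ∀ y ∈ rest', t.count y = rest'.count y := by
        intro y hy
        have hylt : x < y := hdrop y hy
        have hyne : y ≠ x := ne_of_gt hylt
        rw [hcount y (List.mem_cons_of_mem _ ((List.dropWhile_sublist _).mem hy))]
        exact count_after_run x rs y hyne
      have hnotdrop : ∀ y, y ∈ (x :: rs) → y ∉ rest' → y = x := by
        intro y hy hyn
        by_contra hne
        rcases List.mem_cons.mp hy with rfl | hy'
        · exact hne rfl
        · rw [← List.takeWhile_append_dropWhile (p := fun z => z == x) (l := rs)] at hy'
          rcases List.mem_append.mp hy' with h | h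
          · exact hne (by simpa using List.mem_takeWhile_imp h)
          · exact hyn h
      rw [bScan]
      simp only [Option.elim]
      by_cases hgt : lexGtPair (((rs.takeWhile (fun y => y == x)).length : Int) + 1, PySem.Str.len x)
          ((t.count bn : Int), PySem.Str.len bn) = true
      · rw [if_pos hgt, hcx]
        have hxltbn : pkey t x < pkey t bn := by
          rw [pkey_lt_iff]
          simp only [lexGtPair, hcx, Bool.or_eq_true, Bool.and_eq_true, decide_eq_true_eq,
            beq_iff_eq] at hgt
          rcases hgt with h | ⟨h1, h2⟩
          · exact Or.inl h
          · exact Or.inr ⟨h1, Or.inl h2⟩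
        exact ih rest' x hrest'len hrest'pw hrest'count hdrop hxmem
          (fun y hy hyn => by
            by_cases hyx : y = x
            · subst hyx; exact le_refl _
            · have hyrest : y ∉ (x :: rs) := fun hmem => hyx (hnotdrop y hmem hyn)
              exact le_of_lt (lt_of_lt_of_le hxltbn (hproc y hy hyrest)))
      · rw [if_neg hgt]
        have hbnlex : pkey t bn ≤ pkey t x := by
          rw [pkey_le_iff]
          simp only [lexGtPair, hcx, Bool.or_eq_true, Bool.and_eq_true, decide_eq_true_eq,
            beq_iff_eq, not_or, not_and] at hgt
          push_neg at hgt
          obtain ⟨h1, h2⟩ := hgt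
          rcases lt_or_eq_of_le h1 with h | h
          · exact Or.inl h
          · rcases lt_or_eq_of_le (h2 h) with hl | hl
            · exact Or.inr ⟨h.symm, Or.inl hl⟩
            · exact Or.inr ⟨h.symm, Or.inr ⟨hl.symm,
                le_of_lt (hbnlt x List.mem_cons_self)⟩⟩
        exact ih rest' bn hrest'len hrest'pw hrest'count
          (fun y hy => hbnlt y (List.mem_cons_of_mem _ ((List.dropWhile_sublist _).mem hy)))
          hbnmem
          (fun y hy hyn => by
            by_cases hyx : y = x
            · subst hyx; exact hbnlex
            · exact hproc y hy (fun hmem => hyx (hnotdrop y hmem hyn)))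

lemma alt_isMin (ns : List String) (h : ns ≠ []) : PKMin ns (pick_canonical_py_alt ns) := by
  have hperm := PySem.List.sorted_perm ns (fun n => n) false
  have hpw : (PySem.List.sorted ns (fun n => n) false).Pairwise (· ≤ ·) :=
    PySem.List.sorted_pairwise ns (fun n => n)
  set t := PySem.List.sorted ns (fun n => n) false with ht
  have hkey : ∀ a b, pkey t a ≤ pkey t b ↔ pkey ns a ≤ pkey ns b := by
    intro a b
    rw [pkey_le_iff, pkey_le_iff, hperm.count_eq, hperm.count_eq]
  have htne : t ≠ [] := by
    intro hnil
    rw [hnil] at hperm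
    exact h hperm.symm.eq_nil
  obtain ⟨x, rs, hxrs⟩ := List.exists_cons_of_ne_nil htne
  have hpw' : (x :: rs).Pairwise (· ≤ ·) := hxrs ▸ hpw
  obtain ⟨hrun, hdrop⟩ := run_split x rs hpw'
  have hcx : ((rs.takeWhile (fun y => y == x)).length : Int) + 1 = (t.count x : Int) := by
    rw [hxrs, List.count_cons_self, hrun]
    push_cast
    ring
  have hstep : bScan t none "" =
      bScan (rs.dropWhile (fun y => y == x)) (some ((t.count x : Int), PySem.Str.len x)) x := by
    rw [hxrs, bScan]
    simp only [Option.elim, if_pos]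
    rw [hcx, hxrs]
  have hnotdrop : ∀ y, y ∈ (x :: rs) → y ∉ rs.dropWhile (fun z => z == x) → y = x := by
    intro y hy hyn
    by_contra hne
    rcases List.mem_cons.mp hy with rfl | hy'
    · exact hne rfl
    · rw [← List.takeWhile_append_dropWhile (p := fun z => z == x) (l := rs)] at hy'
      rcases List.mem_append.mp hy' with hmem | hmem
      · exact hne (by simpa using List.mem_takeWhile_imp hmem)
      · exact hyn hmem
  obtain ⟨hm, hmin⟩ := bScan_inv t (rs.dropWhile (fun y => y == x)).length
    (rs.dropWhile (fun y => y == x)) x (le_refl _)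
    (hpw'.sublist ((List.dropWhile_sublist _).trans (by simp)))
    (fun y hy => by
      have hylt : x < y := hdrop y hy
      rw [hxrs]
      exact count_after_run x rs y (ne_of_gt hylt))
    hdrop
    (by rw [hxrs]; exact List.mem_cons_self)
    (fun y hy hyn => by
      rw [hxrs] at hy
      have := hnotdrop y hy hyn
      subst this
      exact le_refl _)
  have halt : pick_canonical_py_alt ns = bScan t none "" := rfl
  rw [halt, hstep]
  exact ⟨hperm.subset hm, fun y hy => (hkey _ _).mp (hmin y (hperm.symm.subset hy))⟩

-- ===== VERDICT (by name: the statement is the Claim_ definition above) =====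
theorem pick_canonical_py_spec : Claim_equal_pick_canonical_py := by
  intro ns _ hpre
  exact pkMin_unique (A_isMin ns hpre) (alt_isMin ns hpre)
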